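-- pv_equiv track=rewrite | github.com/ll0zlk/2025-1-Algorithm | prog_assignment_01/prob9.py | best_entry
-- ===== SOURCE A (Python) =====
-- from itertools import combinations
--
-- def best_entry(n, k, players):
--   max_ability = 0
--
--   # 모든 조합 경우의 수 다 탐색하기
--   for team in combinations(range(n), k):
--     ability = sum(players[i][i] for i in team)  # 기본 능력치
--
--     for i in range(k):
--       for j in range(i+1,k):  # 기본 능력치 제외하고 증감 정도 추가
--         ability += players[team[i]][team[j]]
--         ability += players[team[j]][team[i]]
--
--     max_ability = max(max_ability, ability)
--
--   return max_ability
-- ===== SOURCE B (Python) =====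
-- def best_entry(n, k, players):
--     # Recursive DFS over increasing index sets with incremental scoring:
--     # when a player joins a partial team, add their base ability plus both
--     # synergy directions with each current member (no per-team double loop).
--     if k < 0:
--         raise ValueError("k must be non-negative")
--     best = 0
--     def go(start, remaining, members, score):
--         nonlocal best
--         if remaining == 0:
--             if score > best:
--                 best = score
--             return
--         for p in range(start, n - remaining + 1):
--             gain = players[p][p] + sum(players[p][q] + players[q][p] for q in members)
--             members.append(p)
--             go(p + 1, remaining - 1, members, score + gain)
--             members.pop()
--     go(0, k, [], 0)
--     return best
-- ===== Notes on version B (the rewrite author's own statement) =====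
-- stated objective: alternative
-- what changed: Replaces the combinations()-enumeration with a per-team O(k^2) rescoring double loop by a recursive DFS over increasing index sets that scores incrementally (each joining player adds their base ability plus both synergy directions against the current members), never materializing teams or re-walking pairs.
import Mathlib
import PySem

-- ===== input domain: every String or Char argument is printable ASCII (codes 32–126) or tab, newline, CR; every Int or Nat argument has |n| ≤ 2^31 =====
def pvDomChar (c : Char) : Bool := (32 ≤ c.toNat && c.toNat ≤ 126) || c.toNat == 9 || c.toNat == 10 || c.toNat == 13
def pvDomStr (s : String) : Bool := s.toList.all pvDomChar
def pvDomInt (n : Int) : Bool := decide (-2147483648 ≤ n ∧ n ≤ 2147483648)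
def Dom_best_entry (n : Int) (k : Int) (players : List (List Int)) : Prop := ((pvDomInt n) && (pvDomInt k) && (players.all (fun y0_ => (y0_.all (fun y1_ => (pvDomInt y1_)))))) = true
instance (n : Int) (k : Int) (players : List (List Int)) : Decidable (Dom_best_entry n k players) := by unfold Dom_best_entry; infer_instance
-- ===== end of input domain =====

-- B replaces the combinations-then-rescore double loop by a recursive DFS over increasing
-- index sets that scores incrementally as each member joins (objective: alternative decomposition).

-- players[a][b] (total form; Pre_ guarantees every access is in range)
def pvW (players : List (List Int)) (a b : Int) : Int :=
  PySem.List.pyGetD (PySem.List.pyGetD players a []) b 0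

-- ===== PORT A =====
-- itertools.combinations(xs, r) in lexicographic order
def pvCombs : List Int → Nat → List (List Int)
  | _, 0 => [[]]
  | [], _ + 1 => []
  | x :: xs, r + 1 => (pvCombs xs r).map (fun t => x :: t) ++ pvCombs xs (r + 1)

def best_entry (n : Int) (k : Int) (players : List (List Int)) : Int :=
  -- itertools.combinations(pool, r) is empty immediately when r > len(pool)
  if (PySem.List.pyRange 0 n 1).length < k.toNat then 0 else
  (pvCombs (PySem.List.pyRange 0 n 1) k.toNat).foldl
    (fun max_ability team =>
      let ability := (team.map (fun i => pvW players i i)).sum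
      let ability :=
        (PySem.List.pyRange 0 k 1).foldl
          (fun ab i =>
            (PySem.List.pyRange (i + 1) k 1).foldl
              (fun ab j =>
                ab + pvW players (PySem.List.pyGetD team i 0) (PySem.List.pyGetD team j 0)
                   + pvW players (PySem.List.pyGetD team j 0) (PySem.List.pyGetD team i 0))
              ab)
          ability
      max max_ability ability)
    0

-- ===== PORT B =====
-- go(start, remaining, members, score) folding the running best through the DFS
def pvGo (n : Int) (players : List (List Int)) :
    Nat → Int → List Int → Int → Int → Int
  | 0, _start, _members, score, best => if score > best then score else best
  | r + 1, start, members, score, best =>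
      (PySem.List.pyRange start (n - ((r : Int) + 1) + 1) 1).foldl
        (fun best p =>
          let gain := pvW players p p
            + (members.map (fun q => pvW players p q + pvW players q p)).sum
          pvGo n players r (p + 1) (members ++ [p]) (score + gain) best)
        best

def best_entry_alt (n : Int) (k : Int) (players : List (List Int)) : Int :=
  pvGo n players k.toNat 0 [] 0 0

-- ===== PRECONDITION & SPEC =====
-- Pre_ excludes exactly the inputs where A raises: negative k (ValueError from
-- combinations) and, when 1 ≤ k ≤ n, any out-of-range players[·][·] access (IndexError).
def Pre_best_entry (n : Int) (k : Int) (players : List (List Int)) : Prop :=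
  0 ≤ k ∧ (1 ≤ k → k ≤ n →
    (n ≤ (players.length : Int) ∧ ∀ i ∈ List.range n.toNat,
      ((i : Int) < ((players.getD i []).length : Int) ∧
       (2 ≤ k → n ≤ ((players.getD i []).length : Int)))))
instance (n : Int) (k : Int) (players : List (List Int)) : Decidable (Pre_best_entry n k players) := by unfold Pre_best_entry; infer_instance

def pvWitness_best_entry : Int × Int × List (List Int) :=
  (3, 2, [[1, 2, 3], [4, 5, 6], [7, 8, 9]])

def Spec_best_entry (n : Int) (k : Int) (players : List (List Int)) (out : Int) : Prop := out = best_entry_alt n k players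
instance (n : Int) (k : Int) (players : List (List Int)) (out : Int) : Decidable (Spec_best_entry n k players out) := by unfold Spec_best_entry; infer_instance

-- ===== CLAIM (what is proved, stated in full; the proofs are below) =====
def Claim_equal_best_entry : Prop := ∀ (n : Int) (k : Int) (players : List (List Int)), Dom_best_entry n k players → Pre_best_entry n k players → Spec_best_entry n k players (best_entry n k players)

-- ===== LEMMAS AND PROOFS =====

-- pairwise-synergy sum over a team: head element against all later ones, recursively
def pvPair (players : List (List Int)) : List Int → Int
  | [] => 0
  | x :: xs => (xs.map (fun y => pvW players x y + pvW players y x)).sum + pvPair players xs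

-- total ability of a team (diagonal bases + both synergy directions of each pair)
def pvScore (players : List (List Int)) (t : List Int) : Int :=
  (t.map (fun i => pvW players i i)).sum + pvPair players t

-- synergy between a fixed member list and a team
def pvCross (players : List (List Int)) (members t : List Int) : Int :=
  (t.map (fun p => (members.map (fun q => pvW players p q + pvW players q p)).sum)).sum

-- the total incremental gain B accumulates while extending `members` by the team t
def pvGain (players : List (List Int)) : List Int → List Int → Int
  | _members, [] => 0
  | members, p :: t =>
      (pvW players p p + (members.map (fun q => pvW players p q + pvW players q p)).sum)
        + pvGain players (members ++ [p]) t

theorem pvCross_append_singleton (players : List (List Int)) (members t : List Int) (p : Int) :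
    pvCross players (members ++ [p]) t
      = pvCross players members t + (t.map (fun x => pvW players x p + pvW players p x)).sum := by
  unfold pvCross
  rw [← PySem.List.sum_map_add_int]
  congr 1
  apply List.map_congr_left
  intro x _
  simp [add_comm]

theorem pvGain_eq (players : List (List Int)) (t : List Int) :
    ∀ members, pvGain players members t = pvScore players t + pvCross players members t := by
  induction t with
  | nil => intro members; simp [pvGain, pvScore, pvPair, pvCross]
  | cons p t ih =>
      intro members
      have hsym : (t.map (fun x => pvW players x p + pvW players p x)).sum
          = (t.map (fun y => pvW players p y + pvW players y p)).sum := by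
        congr 1; apply List.map_congr_left; intro x _; exact add_comm _ _
      rw [pvGain, ih, pvCross_append_singleton, hsym]
      simp only [pvScore, pvCross, pvPair, List.map_cons, List.sum_cons]
      ring

theorem pvCombs_zero (xs : List Int) : pvCombs xs 0 = [[]] := by
  cases xs <;> rfl

theorem pvCombs_nil (xs : List Int) : ∀ r, xs.length < r → pvCombs xs r = [] := by
  induction xs with
  | nil => intro r h; cases r with
      | zero => omega
      | succ r => rfl
  | cons x xs ih =>
      intro r h
      cases r with
      | zero => omega
      | succ r =>
          simp only [pvCombs]
          rw [ih r (by simpa using Nat.lt_of_succ_lt_succ h), ih (r+1) (by simp at h ⊢; omega)]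
          rfl

theorem pvCombs_length (xs : List Int) : ∀ r t, t ∈ pvCombs xs r → t.length = r := by
  induction xs with
  | nil =>
      intro r t h
      cases r with
      | zero => simp [pvCombs] at h; simp [h]
      | succ r => simp [pvCombs] at h
  | cons x xs ih =>
      intro r t h
      cases r with
      | zero => simp [pvCombs] at h; simp [h]
      | succ r =>
          simp only [pvCombs, List.mem_append, List.mem_map] at h
          rcases h with ⟨t', ht', rfl⟩ | h
          · simp [ih r t' ht']
          · exact ih (r+1) t h

theorem pvCombs_range (n : Int) :
    ∀ (m : Nat) (start : Int) (r : Nat), (n - start).toNat ≤ m →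
      pvCombs (PySem.List.pyRange start n 1) (r + 1)
        = (PySem.List.pyRange start (n - (r : Int)) 1).flatMap
            (fun p => (pvCombs (PySem.List.pyRange (p + 1) n 1) r).map (fun t => p :: t)) := by
  intro m
  induction m with
  | zero =>
      intro start r h
      rw [PySem.List.pyRange_one_eq_nil (by omega : n ≤ start),
        PySem.List.pyRange_one_eq_nil (by omega : n - (r : Int) ≤ start)]
      rfl
  | succ m ih =>
      intro start r h
      by_cases hs : start < n
      · rw [PySem.List.pyRange_one_cons hs]
        by_cases h2 : start < n - (r : Int)
        · rw [PySem.List.pyRange_one_cons h2, List.flatMap_cons]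
          show (pvCombs (PySem.List.pyRange (start+1) n 1) r).map (fun t => start :: t)
                ++ pvCombs (PySem.List.pyRange (start+1) n 1) (r+1) = _
          rw [ih (start + 1) r (by omega)]
        · rw [PySem.List.pyRange_one_eq_nil (by omega : n - (r : Int) ≤ start)]
          show (pvCombs (PySem.List.pyRange (start+1) n 1) r).map (fun t => start :: t)
                ++ pvCombs (PySem.List.pyRange (start+1) n 1) (r+1) = []
          have hlen : (PySem.List.pyRange (start+1) n 1).length = (n - (start+1)).toNat :=
            PySem.List.length_pyRange_one _ _
          rw [pvCombs_nil _ r (by omega), pvCombs_nil _ (r+1) (by omega)]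
          rfl
      · rw [PySem.List.pyRange_one_eq_nil (by omega : n ≤ start),
          PySem.List.pyRange_one_eq_nil (by omega : n - (r : Int) ≤ start)]
        rfl

theorem pvFoldl_flatMap {α β γ : Type} (l : List α) (g : α → List β) (f : γ → β → γ) :
    ∀ init, (l.flatMap g).foldl f init = l.foldl (fun acc x => (g x).foldl f acc) init := by
  induction l with
  | nil => intro init; rfl
  | cons x xs ih =>
      intro init
      rw [List.flatMap_cons, List.foldl_append, List.foldl_cons, ih]

-- B's DFS equals a fold of `max` over the lexicographic combinations list
theorem pvGo_eq (n : Int) (players : List (List Int)) :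
    ∀ (r : Nat) (start : Int) (members : List Int) (score best : Int),
      pvGo n players r start members score best
        = (pvCombs (PySem.List.pyRange start n 1) r).foldl
            (fun mx t => max mx (score + pvGain players members t)) best := by
  intro r
  induction r with
  | zero =>
      intro start members score best
      rw [pvCombs_zero]
      show (if score > best then score else best) = max best (score + pvGain players members [])
      simp only [pvGain]
      rw [max_def]
      split_ifs <;> omega
  | succ r ih =>
      intro start members score best
      have hb : n - ((r : Int) + 1) + 1 = n - (r : Int) := by ring
      rw [pvGo, hb, pvCombs_range n (n - start).toNat start r (le_refl _), pvFoldl_flatMap]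
      apply PySem.List.foldl_congr_mem'
      intro p _ acc
      rw [List.foldl_map, ih]
      apply PySem.List.foldl_congr_mem'
      intro t _ acc'
      show max acc' (score + (pvW players p p
          + (members.map (fun q => pvW players p q + pvW players q p)).sum)
          + pvGain players (members ++ [p]) t)
        = max acc' (score + pvGain players members (p :: t))
      simp only [pvGain]
      ring_nf

theorem pvGetD_cons_succ (x : Int) (xs : List Int) (j : Int) (h : 0 ≤ j) :
    PySem.List.pyGetD (x :: xs) (j + 1) 0 = PySem.List.pyGetD xs j 0 := by
  rw [PySem.List.pyGetD_of_nonneg _ _ (by omega), PySem.List.pyGetD_of_nonneg _ _ h]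
  have : (j + 1).toNat = j.toNat + 1 := by omega
  rw [this, List.getD_cons_succ]

theorem pvRange_shift (a b : Int) :
    PySem.List.pyRange (a + 1) (b + 1) 1 = (PySem.List.pyRange a b 1).map (· + 1) := by
  rw [PySem.List.pyRange_one, PySem.List.pyRange_one]
  have : (b + 1 - (a + 1)).toNat = (b - a).toNat := by omega
  rw [this, List.map_map]
  apply List.map_congr_left
  intro k _
  simp; ring

-- positional double loop over a team = structural pvPair
theorem pvPos_eq (players : List (List Int)) :
    ∀ (t : List Int),
      ((PySem.List.pyRange 0 (t.length : Int) 1).map (fun i =>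
        ((PySem.List.pyRange (i + 1) (t.length : Int) 1).map (fun j =>
          pvW players (PySem.List.pyGetD t i 0) (PySem.List.pyGetD t j 0)
            + pvW players (PySem.List.pyGetD t j 0) (PySem.List.pyGetD t i 0))).sum)).sum
        = pvPair players t := by
  intro t
  induction t with
  | nil => simp [pvPair, PySem.List.pyRange_one_eq_nil]
  | cons x xs ih =>
      have hlen : ((x :: xs).length : Int) = (xs.length : Int) + 1 := by simp
      rw [hlen, PySem.List.pyRange_one_cons (by omega : (0:Int) < (xs.length : Int) + 1)]
      rw [List.map_cons, List.sum_cons]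
      have hx : PySem.List.pyGetD (x :: xs) 0 0 = x := by
        rw [PySem.List.pyGetD_of_nonneg _ _ (by omega)]; rfl
      -- reindex a mapped function over a shifted range
      have shift : ∀ (a : Int) (f : Int → Int), 0 ≤ a →
          ((PySem.List.pyRange (a + 1) ((xs.length : Int) + 1) 1).map f)
            = (PySem.List.pyRange a (xs.length : Int) 1).map (fun j => f (j + 1)) := by
        intro a f _
        rw [pvRange_shift, List.map_map]; rfl
      -- head term: x against every later element
      have hhead :
          ((PySem.List.pyRange (0 + 1) ((xs.length : Int) + 1) 1).map (fun j =>
            pvW players (PySem.List.pyGetD (x :: xs) 0 0) (PySem.List.pyGetD (x :: xs) j 0)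
              + pvW players (PySem.List.pyGetD (x :: xs) j 0) (PySem.List.pyGetD (x :: xs) 0 0))).sum
            = (xs.map (fun y => pvW players x y + pvW players y x)).sum := by
        rw [shift 0 _ (le_refl _)]
        congr 1
        have : ∀ j ∈ PySem.List.pyRange 0 (xs.length : Int) 1,
            (fun j => pvW players (PySem.List.pyGetD (x :: xs) 0 0) (PySem.List.pyGetD (x :: xs) (j+1) 0)
              + pvW players (PySem.List.pyGetD (x :: xs) (j+1) 0) (PySem.List.pyGetD (x :: xs) 0 0)) j
            = (fun j => pvW players x (PySem.List.pyGetD xs j 0)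
              + pvW players (PySem.List.pyGetD xs j 0) x) j := by
          intro j hj
          rw [PySem.List.mem_pyRange_one] at hj
          dsimp only
          rw [hx, pvGetD_cons_succ x xs j hj.1]
        rw [List.map_congr_left this]
        have := PySem.List.map_pyGetD_pyRange_zero' xs (0 : Int)
        calc ((PySem.List.pyRange 0 (xs.length : Int) 1).map
                (fun j => pvW players x (PySem.List.pyGetD xs j 0)
                  + pvW players (PySem.List.pyGetD xs j 0) x))
            = (((PySem.List.pyRange 0 (xs.length : Int) 1).map
                (fun j => PySem.List.pyGetD xs j 0)).map
                (fun y => pvW players x y + pvW players y x)) := by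
              rw [List.map_map]; rfl
          _ = xs.map (fun y => pvW players x y + pvW players y x) := by rw [this]
      -- tail terms: the same double sum over xs
      have htail :
          ((PySem.List.pyRange (0 + 1) ((xs.length : Int) + 1) 1).map (fun i =>
            ((PySem.List.pyRange (i + 1) ((xs.length : Int) + 1) 1).map (fun j =>
              pvW players (PySem.List.pyGetD (x :: xs) i 0) (PySem.List.pyGetD (x :: xs) j 0)
                + pvW players (PySem.List.pyGetD (x :: xs) j 0) (PySem.List.pyGetD (x :: xs) i 0))).sum)).sum
            = pvPair players xs := by
        rw [shift 0 _ (le_refl _)]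
        rw [← ih]
        congr 1
        apply List.map_congr_left
        intro i hi
        rw [PySem.List.mem_pyRange_one] at hi
        dsimp only
        rw [shift (i + 1) _ (by omega)]
        congr 1
        apply List.map_congr_left
        intro j hj
        rw [PySem.List.mem_pyRange_one] at hj
        dsimp only
        rw [pvGetD_cons_succ x xs i hi.1, pvGetD_cons_succ x xs j (by omega)]
      rw [hhead, htail, pvPair]
  
-- A's per-team ability computation = pvScore
theorem pvAbility_eq (players : List (List Int)) (k : Int) (t : List Int)
    (hk : 0 ≤ k) (ht : t.length = k.toNat) :
    (PySem.List.pyRange 0 k 1).foldl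
      (fun ab i =>
        (PySem.List.pyRange (i + 1) k 1).foldl
          (fun ab j =>
            ab + pvW players (PySem.List.pyGetD t i 0) (PySem.List.pyGetD t j 0)
               + pvW players (PySem.List.pyGetD t j 0) (PySem.List.pyGetD t i 0))
          ab)
      ((t.map (fun i => pvW players i i)).sum)
      = pvScore players t := by
  have hk' : k = (t.length : Int) := by omega
  subst hk'
  have step1 : ∀ (init : Int),
      (PySem.List.pyRange 0 (t.length : Int) 1).foldl
        (fun ab i =>
          (PySem.List.pyRange (i + 1) (t.length : Int) 1).foldl
            (fun ab j =>
              ab + pvW players (PySem.List.pyGetD t i 0) (PySem.List.pyGetD t j 0)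
                 + pvW players (PySem.List.pyGetD t j 0) (PySem.List.pyGetD t i 0))
            ab)
        init
      = init + ((PySem.List.pyRange 0 (t.length : Int) 1).map (fun i =>
          ((PySem.List.pyRange (i + 1) (t.length : Int) 1).map (fun j =>
            pvW players (PySem.List.pyGetD t i 0) (PySem.List.pyGetD t j 0)
              + pvW players (PySem.List.pyGetD t j 0) (PySem.List.pyGetD t i 0))).sum)).sum := by
    intro init
    rw [← PySem.List.foldl_add]
    apply PySem.List.foldl_congr_mem'
    intro i _ ab
    rw [← PySem.List.foldl_add]
    apply PySem.List.foldl_congr_mem'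
    intro j _ ab'
    ring
  rw [step1, pvPos_eq]
  rfl

-- ===== VERDICT (by name: the statement is the Claim_ definition above) =====
theorem best_entry_spec : Claim_equal_best_entry := by
  intro n k players _ hpre
  unfold Spec_best_entry best_entry best_entry_alt
  rw [pvGo_eq]
  by_cases hsmall : (PySem.List.pyRange 0 n 1).length < k.toNat
  · rw [if_pos hsmall, pvCombs_nil _ _ hsmall]
    rfl
  rw [if_neg hsmall]
  apply PySem.List.foldl_congr_mem'
  intro t ht mx
  have hlen := pvCombs_length _ _ _ ht
  dsimp only
  rw [pvAbility_eq players k t hpre.1 hlen, pvGain_eq]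
  have hcross : pvCross players [] t = 0 := by
    unfold pvCross
    simp
  rw [hcross]
  ring_nf
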